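-- pv_equiv track=rewrite | github.com/amirrosen1/HMM_POS_Tagger_NLP | Ex3_NLP.py | classify_token
-- ===== SOURCE A (Python) =====
-- def classify_token(token):
--     """
--     Classifies a token into a pseudo-word category based on its characteristics.
--
--     Args:
--         token (str): The token to be classified.
--
--     Returns:
--         str: The pseudo-word category assigned to the token.
--     """
--
--     if token.isdigit():
--         return "<NUMERIC>"
--     elif any(char.isdigit() for char in token) and any(char.isalpha() for char in token):
--         return "<ALNUM>"  # Alpha-numeric tokens
--     elif any(char in token for char in '@#$%&'):
--         return "<SPECIAL>"
--     elif token.isupper():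
--         return "<ALLCAPS>"  # All-uppercase tokens
--     elif token[0].isupper() and not token.isupper():
--         return "<CAP>"
--     elif token[-1] in ".,!?":
--         return "<PUNCTUATED>"  # Tokens ending with punctuation
--     elif len(set(token)) == 1 and len(token) > 2:
--         return "<REPEATED>"
--     elif len(token) <= 3:
--         return "<SHORT>"  # Tokens of length 3 or less
--     elif token.endswith(("ly", "able", "ible", "ment", "tion", "ness", "ship")):
--         return "<SUFFIX>"
--     elif "_" in token:
--         return "<UNDERSCORE>"  # Tokens containing underscores
--     elif token.startswith("http") or token.startswith("www") or token.endswith((".com", ".org", ".net")):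
--         return "<URL>"  # Tokens resembling URLs
--     elif token.isnumeric() and len(token) == 4:
--         return "<YEAR>"  # Four-digit numbers, likely years
--     elif any(char in token for char in "[]{}()<>"):
--         return "<BRACKETS>"
--     elif any(char in token for char in "+-*/="):
--         return "<OPERATOR>"
--     elif "'" in token:
--         return "<CONTRACTION>"  # Tokens containing apostrophes
--     elif token.islower():
--         return "<LOWERCASE>"
--     elif len(token) > 12:
--         return "<VERYLONG>"
--     else:
--         return "<RARE>"  # Default classification for unhandled tokens
-- ===== SOURCE B (Python) =====
-- def classify_token(token):
--     """Same classification via a single feature-extraction pass over the characters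
--     followed by a decision on the collected counts/flags (instead of A's many scans)."""
--     first, last = token[0], token[-1]   # IndexError on empty input, as in the original
--     n = len(token)
--     digits = uppers = lowers = 0
--     special = bracket = operator = apos = under = False
--     uniform = True
--     for c in token:
--         if c.isdigit():
--             digits += 1
--         if c.isupper():
--             uppers += 1
--         if c.islower():
--             lowers += 1
--         special = special or c in "@#$%&"
--         bracket = bracket or c in "[]{}()<>"
--         operator = operator or c in "+-*/="
--         apos = apos or c == "'"
--         under = under or c == "_"
--         uniform = uniform and c == first
--     if digits == n:
--         return "<NUMERIC>"
--     if digits > 0 and (uppers > 0 or lowers > 0):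
--         return "<ALNUM>"
--     if special:
--         return "<SPECIAL>"
--     if uppers > 0 and lowers == 0:
--         return "<ALLCAPS>"
--     if first.isupper():
--         return "<CAP>"          # not all-caps: the previous test already failed
--     if last in ".,!?":
--         return "<PUNCTUATED>"
--     if uniform and n > 2:
--         return "<REPEATED>"
--     if n <= 3:
--         return "<SHORT>"
--     if token.endswith(("ly", "able", "ible", "ment", "tion", "ness", "ship")):
--         return "<SUFFIX>"
--     if under:
--         return "<UNDERSCORE>"
--     if token.startswith(("http", "www")) or token.endswith((".com", ".org", ".net")):
--         return "<URL>"
--     # the original's <YEAR> branch is unreachable: a 4-digit numeric token is <NUMERIC>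
--     if bracket:
--         return "<BRACKETS>"
--     if operator:
--         return "<OPERATOR>"
--     if apos:
--         return "<CONTRACTION>"
--     if lowers > 0 and uppers == 0:
--         return "<LOWERCASE>"
--     if n > 12:
--         return "<VERYLONG>"
--     return "<RARE>"
-- ===== Notes on version B (the rewrite author's own statement) =====
-- stated objective: alternative
-- what changed: A's if/elif ladder of many separate string scans (isdigit, two any()-scans, per-charset membership scans, isupper/islower, set(token)) is replaced by one feature-extraction pass that accumulates character counts and flags, followed by a decision on those features; the unreachable <YEAR> branch is dropped.
import Mathlib
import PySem

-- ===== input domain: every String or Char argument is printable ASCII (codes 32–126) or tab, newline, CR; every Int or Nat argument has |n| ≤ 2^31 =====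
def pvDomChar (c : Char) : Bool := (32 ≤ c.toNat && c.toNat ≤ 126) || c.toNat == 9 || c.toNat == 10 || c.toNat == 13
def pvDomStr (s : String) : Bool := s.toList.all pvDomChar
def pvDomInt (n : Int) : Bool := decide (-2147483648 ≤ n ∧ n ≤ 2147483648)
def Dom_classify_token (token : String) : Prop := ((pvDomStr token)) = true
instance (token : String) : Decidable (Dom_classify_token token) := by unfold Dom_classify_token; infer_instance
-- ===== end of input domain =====

-- B replaces A's if/elif ladder of repeated string scans by ONE feature-extraction pass
-- (character counts and flags) followed by a decision on the collected features (objective: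
-- alternative; same asymptotic cost, single traversal instead of many).

-- ===== PORT A =====
-- shared ports of the Python str built-ins both versions use (exact on the ASCII domain):
-- str.isupper(): at least one cased char and no lowercase char (cased = alphabetic on ASCII)
def pyStrIsupper (t : String) : Bool :=
  t.toList.any PySem.Chars.isalpha && !(t.toList.any PySem.Chars.islower)
-- str.islower(): at least one cased char and no uppercase char (cased = alphabetic on ASCII)
def pyStrIslower (t : String) : Bool :=
  t.toList.any PySem.Chars.isalpha && !(t.toList.any PySem.Chars.isupper)
-- 'c in t' for a single char c: one-char-substring membership = element membership
def pyCharIn (c : Char) (t : String) : Bool := PySem.Chars.isIn [c] t.toList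
-- t[0].isupper(): none = IndexError on empty t (excluded by Pre_)
def pyFirstIsupper (t : String) : Bool :=
  match PySem.Chars.pyGet? t.toList 0 with
  | some c => PySem.Chars.isupper c
  | none => false
-- t[-1] in ".,!?": none = IndexError on empty t (excluded by Pre_)
def pyLastInPunct (t : String) : Bool :=
  match PySem.Chars.pyGet? t.toList (-1) with
  | some c => pyCharIn c ".,!?"
  | none => false

def classify_token (token : String) : String :=
  if PySem.Str.strIsdigit token then "<NUMERIC>"
  else if token.toList.any PySem.Chars.isdigit && token.toList.any PySem.Chars.isalpha then "<ALNUM>"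
  else if "@#$%&".toList.any (fun c => pyCharIn c token) then "<SPECIAL>"
  else if pyStrIsupper token then "<ALLCAPS>"
  else if pyFirstIsupper token && !(pyStrIsupper token) then "<CAP>"
  else if pyLastInPunct token then "<PUNCTUATED>"
  else if (PySem.Set.ofList token.toList).length == 1 && decide (token.toList.length > 2) then "<REPEATED>"
  else if token.toList.length ≤ 3 then "<SHORT>"
  else if ["ly", "able", "ible", "ment", "tion", "ness", "ship"].any
            (fun p => PySem.Chars.endswith token.toList p.toList) then "<SUFFIX>"
  else if pyCharIn '_' token then "<UNDERSCORE>"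
  else if PySem.Chars.startswith token.toList "http".toList
          || PySem.Chars.startswith token.toList "www".toList
          || [".com", ".org", ".net"].any (fun p => PySem.Chars.endswith token.toList p.toList) then "<URL>"
  -- str.isnumeric() coincides with str.isdigit() on the ASCII domain
  else if PySem.Str.strIsdigit token && token.toList.length == 4 then "<YEAR>"
  else if "[]{}()<>".toList.any (fun c => pyCharIn c token) then "<BRACKETS>"
  else if "+-*/=".toList.any (fun c => pyCharIn c token) then "<OPERATOR>"
  else if pyCharIn '\'' token then "<CONTRACTION>"
  else if pyStrIslower token then "<LOWERCASE>"
  else if token.toList.length > 12 then "<VERYLONG>"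
  else "<RARE>"

-- ===== PORT B =====
-- the feature record Source B's single loop accumulates
structure PvFeat where
  digits : Nat
  uppers : Nat
  lowers : Nat
  special : Bool
  bracket : Bool
  oper : Bool
  apos : Bool
  under : Bool
  uniform : Bool
  deriving Repr, DecidableEq

-- one iteration of Source B's loop body
def pvStep (first : Char) (f : PvFeat) (c : Char) : PvFeat :=
  { digits := if PySem.Chars.isdigit c then f.digits + 1 else f.digits
    uppers := if PySem.Chars.isupper c then f.uppers + 1 else f.uppers
    lowers := if PySem.Chars.islower c then f.lowers + 1 else f.lowers
    special := f.special || pyCharIn c "@#$%&"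
    bracket := f.bracket || pyCharIn c "[]{}()<>"
    oper := f.oper || pyCharIn c "+-*/="
    apos := f.apos || (c == '\'')
    under := f.under || (c == '_')
    uniform := f.uniform && (c == first) }

-- Source B's decision on the collected features
def pvDecide (token : String) (first last : Char) (f : PvFeat) : String :=
  let n := token.toList.length
  if f.digits == n then "<NUMERIC>"
  else if decide (0 < f.digits) && (decide (0 < f.uppers) || decide (0 < f.lowers)) then "<ALNUM>"
  else if f.special then "<SPECIAL>"
  else if decide (0 < f.uppers) && (f.lowers == 0) then "<ALLCAPS>"
  else if PySem.Chars.isupper first then "<CAP>"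
  else if pyCharIn last ".,!?" then "<PUNCTUATED>"
  else if f.uniform && decide (n > 2) then "<REPEATED>"
  else if n ≤ 3 then "<SHORT>"
  else if ["ly", "able", "ible", "ment", "tion", "ness", "ship"].any
            (fun p => PySem.Chars.endswith token.toList p.toList) then "<SUFFIX>"
  else if f.under then "<UNDERSCORE>"
  else if ["http", "www"].any (fun p => PySem.Chars.startswith token.toList p.toList)
          || [".com", ".org", ".net"].any (fun p => PySem.Chars.endswith token.toList p.toList) then "<URL>"
  else if f.bracket then "<BRACKETS>"
  else if f.oper then "<OPERATOR>"
  else if f.apos then "<CONTRACTION>"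
  else if decide (0 < f.lowers) && (f.uppers == 0) then "<LOWERCASE>"
  else if n > 12 then "<VERYLONG>"
  else "<RARE>"

def classify_token_alt (token : String) : String :=
  -- first, last = token[0], token[-1]: none = IndexError on empty input (outside Pre_)
  match PySem.Chars.pyGet? token.toList 0, PySem.Chars.pyGet? token.toList (-1) with
  | some first, some last =>
      pvDecide token first last
        (token.toList.foldl (pvStep first) ⟨0, 0, 0, false, false, false, false, false, true⟩)
  | _, _ => "<RARE>"

-- ===== PRECONDITION & SPEC =====
-- Pre_ excludes only the empty token, on which both Pythons raise IndexError at token[0].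
def Pre_classify_token (token : String) : Prop := token ≠ ""
instance (token : String) : Decidable (Pre_classify_token token) := by unfold Pre_classify_token; infer_instance
def pvWitness_classify_token : String := "Abc"
def Spec_classify_token (token : String) (out : String) : Prop := out = classify_token_alt token
instance (token : String) (out : String) : Decidable (Spec_classify_token token out) := by unfold Spec_classify_token; infer_instance

-- ===== CLAIM =====
def Claim_equal_classify_token : Prop := ∀ (token : String), Dom_classify_token token → Pre_classify_token token → Spec_classify_token token (classify_token token)

-- ===== LEMMAS AND PROOFS =====

-- ===== LEMMAS AND PROOFS =====

theorem pvFold_eq (first : Char) (l : List Char) (f : PvFeat) :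
    l.foldl (pvStep first) f =
      { digits := f.digits + l.countP PySem.Chars.isdigit
        uppers := f.uppers + l.countP PySem.Chars.isupper
        lowers := f.lowers + l.countP PySem.Chars.islower
        special := f.special || l.any (fun c => pyCharIn c "@#$%&")
        bracket := f.bracket || l.any (fun c => pyCharIn c "[]{}()<>")
        oper := f.oper || l.any (fun c => pyCharIn c "+-*/=")
        apos := f.apos || l.any (fun c => c == '\'')
        under := f.under || l.any (fun c => c == '_')
        uniform := f.uniform && l.all (fun c => c == first) } := by
  induction l generalizing f with
  | nil => simp
  | cons a t ih =>
    rw [List.foldl_cons, ih]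
    simp only [pvStep, List.countP_cons, List.any_cons, List.all_cons, PvFeat.mk.injEq]
    refine ⟨?_, ?_, ?_, ?_, ?_, ?_, ?_, ?_, ?_⟩ <;>
      first
        | (split_ifs <;> omega)
        | (simp only [Bool.or_assoc, Bool.and_assoc])

theorem pvIsIn_singleton (c : Char) (l : List Char) : PySem.Chars.isIn [c] l = l.contains c := by
  by_cases h : c ∈ l
  · rw [(PySem.Chars.isIn_iff_infix [c] l).mpr ((List.singleton_infix_iff c l).mpr h)]
    simp [h]
  · rw [(PySem.Chars.isIn_eq_false_iff [c] l).mpr (fun hi => h ((List.singleton_infix_iff c l).mp hi))]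
    simp [h]

theorem pvCountP_eq_length (p : Char → Bool) (l : List Char) :
    (l.countP p == l.length) = l.all p := by
  by_cases h : ∀ x ∈ l, p x = true
  · simp [List.countP_eq_length.mpr h, List.all_eq_true.mpr h]
  · have h1 : l.countP p ≠ l.length := fun he => h (List.countP_eq_length.mp he)
    have h2 : l.all p = false := by
      rcases not_forall.mp h with ⟨x, hx⟩
      rcases Classical.not_imp.mp hx with ⟨hx1, hx2⟩
      exact List.all_eq_false.mpr ⟨x, hx1, by simpa using hx2⟩
    simp [h2, beq_eq_false_iff_ne.mpr h1]

theorem pvCountP_pos (p : Char → Bool) (l : List Char) :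
    decide (0 < l.countP p) = l.any p := by
  by_cases h : l.any p = true
  · rcases List.any_eq_true.mp h with ⟨x, hx, hpx⟩
    have h0 : l.countP p ≠ 0 := fun he => by
      have := List.countP_eq_zero.mp he x hx
      simp_all
    simp [h, Nat.pos_iff_ne_zero, h0]
  · have h0 : l.countP p = 0 := List.countP_eq_zero.mpr (by
      intro x hx
      rcases Bool.eq_false_or_eq_true (p x) with h'|h'
      · exact absurd (List.any_eq_true.mpr ⟨x, hx, h'⟩) h
      · simp [h'])
    simp [Bool.eq_false_iff.mpr h, h0]

theorem pvCountP_eq_zero (p : Char → Bool) (l : List Char) :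
    (l.countP p == 0) = !(l.any p) := by
  by_cases h : l.any p = true
  · rcases List.any_eq_true.mp h with ⟨x, hx, hpx⟩
    have h0 : l.countP p ≠ 0 := fun he => by
      have := List.countP_eq_zero.mp he x hx
      simp_all
    simp [h, beq_eq_false_iff_ne.mpr h0]
  · have h0 : l.countP p = 0 := List.countP_eq_zero.mpr (by
      intro x hx
      rcases Bool.eq_false_or_eq_true (p x) with h'|h'
      · exact absurd (List.any_eq_true.mpr ⟨x, hx, h'⟩) h
      · simp [h'])
    simp [Bool.eq_false_iff.mpr h, h0]

theorem pvAny_alpha (l : List Char) :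
    l.any PySem.Chars.isalpha = (l.any PySem.Chars.isupper || l.any PySem.Chars.islower) := by
  have hc : ∀ c : Char, PySem.Chars.isalpha c = (PySem.Chars.isupper c || PySem.Chars.islower c) := by
    intro c; simp [PySem.Chars.isalpha, PySem.Chars.isupper, PySem.Chars.islower]
  induction l with
  | nil => rfl
  | cons a t ih => simp only [List.any_cons, ih, hc a, Bool.or_assoc, Bool.or_left_comm]

theorem pvAny_contains (l m : List Char) :
    (l.any fun x => m.contains x) = decide (∃ x, x ∈ l ∧ x ∈ m) := by
  by_cases h : ∃ x, x ∈ l ∧ x ∈ m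
  · rcases h with ⟨x, hl, hm⟩
    rw [decide_eq_true (show ∃ x, x ∈ l ∧ x ∈ m from ⟨x, hl, hm⟩)]
    exact List.any_eq_true.mpr ⟨x, hl, by simpa using hm⟩
  · simp only [decide_eq_false h]
    refine List.any_eq_false.mpr ?_
    intro x hx
    simp only [List.contains_eq_mem]
    exact fun hm => h ⟨x, hx, by simpa using hm⟩

theorem pvSet_len_one (c : Char) (cs : List Char) :
    ((PySem.Set.ofList (c :: cs)).length == 1) = cs.all (fun x => x == c) := by
  by_cases h : ∀ x ∈ cs, x = c
  · have hfold : ∀ t : List Char, (∀ x ∈ t, x = c) → t.foldl PySem.Set.add [c] = [c] := by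
      intro t
      induction t with
      | nil => intro _; rfl
      | cons a u ih =>
        intro ht
        have ha : a = c := ht a (by simp)
        simp only [List.foldl_cons, ha]
        rw [show PySem.Set.add [c] c = [c] by simp [PySem.Set.add]]
        exact ih (fun x hx => ht x (by simp [hx]))
    rw [PySem.Set.ofList_eq_foldl]
    simp only [List.foldl_cons]
    rw [show PySem.Set.add [] c = [c] by simp [PySem.Set.add]]
    rw [hfold cs h]
    simpa [List.all_eq_true] using h
  · rcases not_forall.mp h with ⟨x, hx⟩
    rcases Classical.not_imp.mp hx with ⟨hx1, hx2⟩
    have hlen : (PySem.Set.ofList (c :: cs)).length ≠ 1 := by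
      intro he
      rcases List.length_eq_one_iff.mp he with ⟨y, hy⟩
      have hcm : c ∈ PySem.Set.ofList (c :: cs) := (PySem.Set.mem_ofList _ _).mpr (by simp)
      have hxm : x ∈ PySem.Set.ofList (c :: cs) := (PySem.Set.mem_ofList _ _).mpr (by simp [hx1])
      rw [hy] at hcm hxm
      simp at hcm hxm
      exact hx2 (hxm.trans hcm.symm)
    simp [beq_eq_false_iff_ne.mpr hlen, List.all_eq_false]
    exact ⟨x, hx1, by simpa using hx2⟩

theorem pvStrIsdigit_cons (c : Char) (cs : List Char) :
    PySem.Chars.strIsdigit (c :: cs) = (c :: cs).all PySem.Chars.isdigit := by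
  simp [PySem.Chars.strIsdigit]

theorem pvAll_cons_self (c : Char) (cs : List Char) :
    (c :: cs).all (fun x => x == c) = cs.all (fun x => x == c) := by
  simp

theorem pvOrNotAnd (x y : Bool) : ((x || y) && !y) = (x && !y) := by
  cases x <;> cases y <;> rfl

theorem pvOrNotAnd' (x y : Bool) : ((x || y) && !x) = (y && !x) := by
  cases x <;> cases y <;> rfl

theorem pvSwap (m l : List Char) :
    (m.any fun x => l.contains x) = (l.any fun x => m.contains x) := by
  rw [pvAny_contains, pvAny_contains]
  exact decide_eq_decide.mpr (by tauto)

theorem pvUrlAny (l : List Char) :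
    ((["http", "www"] : List String).any fun p => PySem.Chars.startswith l p.toList) =
      (PySem.Chars.startswith l "http".toList || PySem.Chars.startswith l "www".toList) := by
  simp [List.any_cons]

theorem main_eq (token : String) (h : Pre_classify_token token) :
    classify_token token = classify_token_alt token := by
  have hl : token.toList ≠ [] := by
    intro he
    exact h (by simpa [String.toList_eq_nil_iff] using he)
  obtain ⟨c, cs, hcs⟩ := List.exists_cons_of_ne_nil hl
  have hg0 : PySem.Chars.pyGet? (c :: cs) 0 = some c := by
    simp [PySem.Chars.pyGet?, PySem.List.pyGet?, PySem.List.pyIdx?]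
  obtain ⟨lst, hg1⟩ : ∃ y, PySem.Chars.pyGet? (c :: cs) (-1) = some y :=
    Option.isSome_iff_exists.mp
      (by simp [PySem.Chars.pyGet?, PySem.List.pyGet?, PySem.List.pyIdx?])
  rw [classify_token_alt, classify_token]
  simp only [pvDecide, pvFold_eq, pyStrIsupper, pyStrIslower, pyFirstIsupper, pyLastInPunct,
    pyCharIn, PySem.Str.strIsdigit_eq, hcs, hg0, hg1]
  simp only [Nat.zero_add, Bool.false_or, Bool.true_and, pvStrIsdigit_cons, pvIsIn_singleton,
    pvCountP_eq_length, pvCountP_pos, pvCountP_eq_zero, pvAny_alpha, List.any_beq',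
    pvSet_len_one, pvAll_cons_self, pvUrlAny, pvOrNotAnd, pvOrNotAnd']
  rw [pvSwap "@#$%&".toList, pvSwap "[]{}()<>".toList, pvSwap "+-*/=".toList]
  by_cases hD : ((c :: cs).all PySem.Chars.isdigit) = true
  · simp only [hD, if_true]
  · have hDf : (c :: cs).all PySem.Chars.isdigit = false := by rwa [Bool.not_eq_true] at hD
    by_cases hAC : ((c :: cs).any PySem.Chars.isupper && !(c :: cs).any PySem.Chars.islower) = true
    · simp only [hDf, hAC, Bool.false_eq_true, if_false, Bool.false_and, Bool.not_true,
        Bool.and_false, if_true]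
    · have hACf : ((c :: cs).any PySem.Chars.isupper && !(c :: cs).any PySem.Chars.islower) = false := by
        rwa [Bool.not_eq_true] at hAC
      simp only [hDf, hACf, Bool.false_eq_true, if_false, Bool.false_and, Bool.not_false,
        Bool.and_true]

-- ===== VERDICT =====
theorem classify_token_spec : Claim_equal_classify_token := by
  intro token _ hpre
  exact main_eq token hpre
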